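-- pv_equiv track=rewrite | github.com/bancaditalia/secp256k1-frost | tools/test_vectors_h2c_reduce_bigint_mod_p_generate.py | format_c_limbs
-- ===== SOURCE A (Python) =====
-- from typing import Iterator, Tuple
--
-- def format_c_limbs(limbs: Tuple[int, ...]) -> str:
--     """Format limbs as C array initializer."""
--     if len(limbs) <= 4:
--         # Short format for small arrays
--         return "{" + ', '.join(f"0x{l:016x}" for l in limbs) + "}"
--     else:
--         # Multi-line format for large arrays
--         formatted = "{\n    "
--         for i, limb in enumerate(limbs):
--             if i > 0 and i % 4 == 0:
--                 formatted += ",\n    "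
--             elif i > 0:
--                 formatted += ", "
--             formatted += f"0x{limb:016x}"
--         formatted += "\n  }"
--         return formatted
-- ===== SOURCE B (Python) =====
-- def format_c_limbs(limbs):
--     """Format limbs as C array initializer."""
--     hexes = [f"0x{l:016x}" for l in limbs]
--     if len(limbs) <= 4:
--         return "{" + ', '.join(hexes) + "}"
--     lines = []
--     i = 0
--     while i < len(hexes):
--         lines.append(', '.join(hexes[i:i+4]))
--         i += 4
--     return "{\n    " + ',\n    '.join(lines) + "\n  }"
-- ===== Notes on version B (the rewrite author's own statement) =====
-- stated objective: simpler
-- what changed: Replaces A's single per-limb loop with a running index and i%4 separator test by building the hex tokens once, grouping them into chunks of four joined with ', ', and joining the chunks with ',\n '.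
import Mathlib
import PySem

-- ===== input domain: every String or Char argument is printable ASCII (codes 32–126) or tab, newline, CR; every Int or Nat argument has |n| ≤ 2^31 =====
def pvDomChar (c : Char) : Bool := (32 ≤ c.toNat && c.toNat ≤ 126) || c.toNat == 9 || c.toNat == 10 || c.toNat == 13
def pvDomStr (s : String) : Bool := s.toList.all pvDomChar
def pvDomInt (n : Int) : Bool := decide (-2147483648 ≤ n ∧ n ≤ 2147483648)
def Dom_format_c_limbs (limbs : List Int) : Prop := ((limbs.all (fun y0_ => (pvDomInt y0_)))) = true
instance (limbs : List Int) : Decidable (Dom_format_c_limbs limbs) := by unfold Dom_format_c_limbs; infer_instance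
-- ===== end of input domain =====

-- B replaces A's per-limb loop with its running index/modulo test by a chunk-of-4 grouping
-- joined with the two separators (objective: simpler decomposition, same linear cost).

-- shared helper: exact port of the f-string "0x{l:016x}" (lowercase hex, zero-padded to
-- width 16, the sign of a negative number in front) — both Pythons use this same format
def natHexChars (n : Nat) : List Char :=
  if _h : n < 16 then [Nat.digitChar n]
  else natHexChars (n / 16) ++ [Nat.digitChar (n % 16)]
  termination_by n
  decreasing_by exact Nat.div_lt_self (by omega) (by omega)

def hexTok (l : Int) : List Char :=
  '0' :: 'x' :: PySem.Chars.zfill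
    (if l < 0 then '-' :: natHexChars l.natAbs else natHexChars l.natAbs) 16

-- ===== PORT A =====
def format_c_limbs (limbs : List Int) : String :=
  if PySem.List.len limbs ≤ 4 then
    String.mk ('{' :: PySem.Chars.join (", ".toList) (limbs.map hexTok) ++ ['}'])
  else
    let body := (PySem.List.enumerate limbs).foldl
      (fun acc p =>
        if p.1 > 0 ∧ PySem.Int.mod p.1 4 = 0 then acc ++ ",\n    ".toList ++ hexTok p.2
        else if p.1 > 0 then acc ++ ", ".toList ++ hexTok p.2
        else acc ++ hexTok p.2)
      ("{\n    ".toList)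
    String.mk (body ++ "\n  }".toList)

-- ===== PORT B =====
-- the "while i < len(hexes): append ', '.join(hexes[i:i+4]); i += 4" loop of Source B
def linesGo (hexes : List (List Char)) (i : Nat) : List (List Char) :=
  if i < hexes.length then
    PySem.Chars.join (", ".toList)
        (PySem.List.slice hexes (some (i : Int)) (some ((i : Int) + ((4 : Nat) : Int)))) ::
      linesGo hexes (i + 4)
  else []
  termination_by hexes.length - i

def format_c_limbs_alt (limbs : List Int) : String :=
  let hexes := limbs.map hexTok
  if PySem.List.len limbs ≤ 4 then
    String.mk ('{' :: PySem.Chars.join (", ".toList) hexes ++ ['}'])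
  else
    String.mk ("{\n    ".toList ++
      PySem.Chars.join (",\n    ".toList) (linesGo hexes 0) ++ "\n  }".toList)

-- ===== PRECONDITION & SPEC =====
def Spec_format_c_limbs (limbs : List Int) (out : String) : Prop := out = format_c_limbs_alt limbs
instance (limbs : List Int) (out : String) : Decidable (Spec_format_c_limbs limbs out) := by unfold Spec_format_c_limbs; infer_instance

-- ===== CLAIM (what is proved, stated in full; the proofs are below) =====
def Claim_equal_format_c_limbs : Prop := ∀ (limbs : List Int), Dom_format_c_limbs limbs → Spec_format_c_limbs limbs (format_c_limbs limbs)

-- ===== LEMMAS AND PROOFS =====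

-- linesGo, re-expressed as a chunk recursion on the not-yet-processed suffix
def linesOf : List (List Char) → List (List Char)
  | [] => []
  | h :: t => PySem.Chars.join (", ".toList) ((h :: t).take 4) :: linesOf ((h :: t).drop 4)
  termination_by l => l.length
  decreasing_by simp

theorem linesGo_eq (hexes : List (List Char)) (i : Nat) :
    linesGo hexes i = linesOf (hexes.drop i) := by
  rw [linesGo]
  by_cases h : i < hexes.length
  · rw [if_pos h, PySem.List.slice_natCast_add, linesGo_eq hexes (i + 4)]
    have hne : hexes.drop i ≠ [] := by
      simp only [ne_eq, List.drop_eq_nil_iff]; omega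
    cases hd : hexes.drop i with
    | nil => exact absurd hd hne
    | cons x t =>
      rw [show hexes.drop (i + 4) = (hexes.drop i).drop 4 by
            rw [List.drop_drop], hd]
      conv_rhs => rw [linesOf]
  · rw [if_neg h, show hexes.drop i = [] from by
      simp only [List.drop_eq_nil_iff]; omega]
    rw [linesOf]
  termination_by hexes.length - i

-- A's separator before the limb at index i
def sepA (i : Int) : List Char :=
  if i > 0 ∧ PySem.Int.mod i 4 = 0 then ",\n    ".toList
  else if i > 0 then ", ".toList else []

-- A's loop as structural recursion carrying the index
def goA (i : Int) : List Int → List Char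
  | [] => []
  | l :: t => sepA i ++ hexTok l ++ goA (i + 1) t

theorem foldlA (xs : List Int) : ∀ (acc : List Char) (i : Int),
    (PySem.List.enumerate xs i).foldl
      (fun acc p =>
        if p.1 > 0 ∧ PySem.Int.mod p.1 4 = 0 then acc ++ ",\n    ".toList ++ hexTok p.2
        else if p.1 > 0 then acc ++ ", ".toList ++ hexTok p.2
        else acc ++ hexTok p.2) acc
    = acc ++ goA i xs := by
  induction xs with
  | nil => intro acc i; simp [PySem.List.enumerate_nil, goA]
  | cons a t ih =>
    intro acc i
    rw [PySem.List.enumerate_cons]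
    simp only [List.foldl_cons, ih, goA, sepA]
    split_ifs <;> simp

theorem sepA_of_dvd {i : Int} (h0 : 0 ≤ i) (h4 : (4 : Int) ∣ i) :
    sepA i = if i = 0 then [] else ",\n    ".toList := by
  simp only [sepA, PySem.Int.mod_eq_zero_iff_dvd]
  split_ifs <;> first | rfl | omega

theorem sepA_of_not_dvd {i : Int} (h0 : 0 < i) (h4 : ¬ (4 : Int) ∣ i) :
    sepA i = ", ".toList := by
  simp only [sepA, PySem.Int.mod_eq_zero_iff_dvd]
  split_ifs <;> first | rfl | omega

theorem goA_start (xs : List Int) (i : Int) (h0 : 0 ≤ i) (h4 : (4 : Int) ∣ i) :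
    goA i xs = if xs = [] then [] else
      (if i = 0 then [] else ",\n    ".toList) ++
        PySem.Chars.join (",\n    ".toList) (linesOf (xs.map hexTok)) := by
  match xs with
  | [] => simp [goA]
  | [a] =>
      simp [goA, linesOf, PySem.Chars.join_singleton, sepA_of_dvd h0 h4]
  | [a, b] =>
      rw [show goA i [a,b] = sepA i ++ hexTok a ++ (sepA (i+1) ++ hexTok b ++ []) from rfl,
        sepA_of_dvd h0 h4, sepA_of_not_dvd (by omega) (by omega)]
      simp [linesOf, PySem.Chars.join_singleton, PySem.Chars.join_cons_cons]
  | [a, b, c] =>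
      simp only [goA]
      rw [sepA_of_dvd h0 h4, sepA_of_not_dvd (i := i+1) (by omega) (by omega),
        sepA_of_not_dvd (i := i+1+1) (by omega) (by omega)]
      simp [linesOf, PySem.Chars.join_singleton, PySem.Chars.join_cons_cons]
  | [a, b, c, d] =>
      simp only [goA]
      rw [sepA_of_dvd h0 h4, sepA_of_not_dvd (i := i+1) (by omega) (by omega),
        sepA_of_not_dvd (i := i+1+1) (by omega) (by omega),
        sepA_of_not_dvd (i := i+1+1+1) (by omega) (by omega)]
      simp [linesOf, PySem.Chars.join_singleton, PySem.Chars.join_cons_cons]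
  | a :: b :: c :: d :: e :: t =>
      have ih := goA_start (e :: t) (i + 4) (by omega) (by omega)
      simp only [goA]
      rw [sepA_of_dvd h0 h4, sepA_of_not_dvd (i := i+1) (by omega) (by omega),
        sepA_of_not_dvd (i := i+1+1) (by omega) (by omega),
        sepA_of_not_dvd (i := i+1+1+1) (by omega) (by omega)]
      rw [show i+1+1+1+1 = i+4 by ring]
      rw [show sepA (i+4) ++ hexTok e ++ goA (i+4+1) t = goA (i+4) (e::t) from rfl, ih,
        if_neg (show ¬ (e :: t = []) by simp), if_neg (show ¬ i+4 = 0 by omega)]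
      simp [linesOf, PySem.Chars.join_singleton, PySem.Chars.join_cons_cons]
  termination_by xs.length

-- ===== VERDICT (by name: the statement is the Claim_ definition above) =====
theorem format_c_limbs_spec : Claim_equal_format_c_limbs := by
  intro limbs _
  unfold Spec_format_c_limbs format_c_limbs format_c_limbs_alt
  by_cases h : limbs.length ≤ 4
  · simp [h]
  · have h' : ¬ PySem.List.len limbs ≤ 4 := by simp; omega
    rw [if_neg h', if_neg h']
    have hne : limbs ≠ [] := by intro he; subst he; simp at h
    rw [foldlA, goA_start limbs 0 (by omega) ⟨0, by ring⟩, if_neg hne, linesGo_eq,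
      List.drop_zero]
    simp
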